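-- pv_equiv track=rewrite | github.com/ItsSamarth/ds-python | DataStructures/string/subsequence/subsequence-form.py | countSubsequences
-- ===== SOURCE A (Python) =====
-- def countSubsequences(str):
--     aCount = 0
--     bCount = 0
--     cCount = 0
--
--     for i in range(len(str)):
--         if str[i] == 'a':
--             aCount = (1 + 2 * aCount)
--         elif str[i] == 'b':
--             bCount = aCount + 2 * bCount
--         elif str[i] == 'c':
--             cCount = bCount + 2 * cCount
--
--     return cCount
-- ===== SOURCE B (Python) =====
-- def _merge(L, R):
--     A1, B1, C1, AB1, BC1, ABC1 = L
--     A2, B2, C2, AB2, BC2, ABC2 = R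
--     return (
--         A1 + A2 + A1 * A2,
--         B1 + B2 + B1 * B2,
--         C1 + C2 + C1 * C2,
--         AB2 + A1 * (B2 + AB2) + AB1 * (1 + B2),
--         BC2 + B1 * (C2 + BC2) + BC1 * (1 + C2),
--         ABC2 + A1 * (BC2 + ABC2) + AB1 * (C2 + BC2) + ABC1 * (1 + C2),
--     )
--
--
-- def _solve(s, lo, hi):
--     if hi - lo == 0:
--         return (0, 0, 0, 0, 0, 0)
--     if hi - lo == 1:
--         ch = s[lo]
--         return (1 if ch == 'a' else 0,
--                 1 if ch == 'b' else 0,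
--                 1 if ch == 'c' else 0,
--                 0, 0, 0)
--     mid = (lo + hi) // 2
--     return _merge(_solve(s, lo, mid), _solve(s, mid, hi))
--
--
-- def countSubsequences(str):
--     return _solve(str, 0, len(str))[5]
-- ===== Notes on version B (the rewrite author's own statement) =====
-- stated objective: alternative
-- what changed: Replaces A's single left-to-right scan with three scalar counters by a recursive divide-and-conquer: each half of the string is summarized by a composable 6-component vector (counts of index subsets matching a+, b+, c+, a+b+, b+c+, a+b+c+) and halves are combined with an algebraic merge rule.
import Mathlib
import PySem

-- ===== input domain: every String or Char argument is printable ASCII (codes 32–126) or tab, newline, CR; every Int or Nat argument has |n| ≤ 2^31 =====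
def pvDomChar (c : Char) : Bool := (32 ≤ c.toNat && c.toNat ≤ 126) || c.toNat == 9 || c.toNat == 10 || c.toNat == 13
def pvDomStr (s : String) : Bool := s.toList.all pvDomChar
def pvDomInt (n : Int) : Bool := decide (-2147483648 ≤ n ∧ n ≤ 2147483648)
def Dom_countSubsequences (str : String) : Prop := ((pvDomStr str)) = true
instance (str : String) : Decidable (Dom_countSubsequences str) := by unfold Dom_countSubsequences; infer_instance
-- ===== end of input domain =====

-- B replaces A's single left-to-right scan with three counters by a divide-and-conquer
-- over string halves combining composable 6-component subsequence summaries; alternative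
-- decomposition, same asymptotic cost.

-- ===== PORT A =====
-- A's loop body over each character, state (aCount, bCount, cCount)
def pvAStep (s : Int × Int × Int) (c : Char) : Int × Int × Int :=
  if c = 'a' then (1 + 2 * s.1, s.2.1, s.2.2)
  else if c = 'b' then (s.1, s.1 + 2 * s.2.1, s.2.2)
  else if c = 'c' then (s.1, s.2.1, s.2.1 + 2 * s.2.2)
  else s

def countSubsequences (str : String) : Int :=
  (str.toList.foldl pvAStep (0, 0, 0)).2.2

-- ===== PORT B =====
-- summary of a segment: counts of index subsets matching a+, b+, c+, a+b+, b+c+, a+b+c+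
structure PvS6 where
  a : Int
  b : Int
  c : Int
  ab : Int
  bc : Int
  abc : Int
deriving DecidableEq, Repr

def pvMerge (l r : PvS6) : PvS6 :=
  { a := l.a + r.a + l.a * r.a
  , b := l.b + r.b + l.b * r.b
  , c := l.c + r.c + l.c * r.c
  , ab := r.ab + l.a * (r.b + r.ab) + l.ab * (1 + r.b)
  , bc := r.bc + l.b * (r.c + r.bc) + l.bc * (1 + r.c)
  , abc := r.abc + l.a * (r.bc + r.abc) + l.ab * (r.c + r.bc) + l.abc * (1 + r.c) }

def pvZero : PvS6 := ⟨0, 0, 0, 0, 0, 0⟩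

def pvLeaf (ch : Char) : PvS6 :=
  ⟨if ch = 'a' then 1 else 0, if ch = 'b' then 1 else 0, if ch = 'c' then 1 else 0, 0, 0, 0⟩

-- B's recursive half-splitting solve (lo/hi index pair rendered as the sublist)
def pvSolve (l : List Char) : PvS6 :=
  match l with
  | [] => pvZero
  | [ch] => pvLeaf ch
  | c1 :: c2 :: rest =>
    pvMerge (pvSolve ((c1 :: c2 :: rest).take ((c1 :: c2 :: rest).length / 2)))
            (pvSolve ((c1 :: c2 :: rest).drop ((c1 :: c2 :: rest).length / 2)))
termination_by l.length
decreasing_by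
  · simp only [List.length_take, List.length_cons]; omega
  · simp only [List.length_drop, List.length_cons]; omega

def countSubsequences_alt (str : String) : Int :=
  (pvSolve str.toList).abc

-- ===== PRECONDITION & SPEC =====
def Spec_countSubsequences (str : String) (out : Int) : Prop := out = countSubsequences_alt str
instance (str : String) (out : Int) : Decidable (Spec_countSubsequences str out) := by unfold Spec_countSubsequences; infer_instance

-- ===== CLAIM (what is proved, stated in full; the proofs are below) =====
def Claim_equal_countSubsequences : Prop := ∀ (str : String), Dom_countSubsequences str → Spec_countSubsequences str (countSubsequences str)

-- ===== LEMMAS AND PROOFS =====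
-- left fold of single-character summaries; the bridge between the two ports
def pvVfold (l : List Char) : PvS6 := l.foldl (fun s ch => pvMerge s (pvLeaf ch)) pvZero

theorem pvMerge_zero_left (x : PvS6) : pvMerge pvZero x = x := by
  cases x; simp [pvMerge, pvZero]

theorem pvMerge_assoc (x y z : PvS6) : pvMerge (pvMerge x y) z = pvMerge x (pvMerge y z) := by
  cases x; cases y; cases z
  simp only [pvMerge, PvS6.mk.injEq]
  refine ⟨by ring, by ring, by ring, by ring, by ring, by ring⟩

theorem pvFoldl_merge (l : List Char) (s : PvS6) :
    l.foldl (fun s ch => pvMerge s (pvLeaf ch)) s = pvMerge s (pvVfold l) := by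
  induction l generalizing s with
  | nil => simp [pvVfold, pvMerge, pvZero]
  | cons ch t ih =>
    simp only [pvVfold, List.foldl_cons] at *
    rw [ih, ih (pvMerge pvZero (pvLeaf ch)), pvMerge_zero_left, pvMerge_assoc]

theorem pvSolve_eq_vfold (l : List Char) : pvSolve l = pvVfold l := by
  fun_induction pvSolve l with
  | case1 => simp [pvVfold]
  | case2 ch => simp [pvVfold, pvMerge_zero_left]
  | case3 c1 c2 rest ih1 ih2 =>
    rw [ih1, ih2]
    have h : (c1 :: c2 :: rest) =
        (c1 :: c2 :: rest).take ((c1 :: c2 :: rest).length / 2) ++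
        (c1 :: c2 :: rest).drop ((c1 :: c2 :: rest).length / 2) := (List.take_append_drop _ _).symm
    conv_rhs => rw [h]
    unfold pvVfold
    rw [List.foldl_append, pvFoldl_merge, pvFoldl_merge]
    rw [pvMerge_zero_left, pvFoldl_merge, pvMerge_zero_left]

-- the 6-state summary projects onto A's three counters
theorem pvProj (l : List Char) (s : PvS6) :
    ((l.foldl (fun s ch => pvMerge s (pvLeaf ch)) s).a,
     (l.foldl (fun s ch => pvMerge s (pvLeaf ch)) s).ab,
     (l.foldl (fun s ch => pvMerge s (pvLeaf ch)) s).abc)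
      = l.foldl pvAStep (s.a, s.ab, s.abc) := by
  induction l generalizing s with
  | nil => simp
  | cons ch t ih =>
    simp only [List.foldl_cons]
    rw [ih]
    congr 1
    by_cases h1 : ch = 'a' <;> by_cases h2 : ch = 'b' <;> by_cases h3 : ch = 'c' <;>
      simp_all [pvMerge, pvLeaf, pvAStep, Prod.ext_iff] <;> omega

-- ===== VERDICT (by name: the statement is the Claim_ definition above) =====
theorem countSubsequences_spec : Claim_equal_countSubsequences := by
  intro str _
  unfold Spec_countSubsequences countSubsequences countSubsequences_alt
  rw [pvSolve_eq_vfold]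
  have h := pvProj str.toList pvZero
  unfold pvVfold
  have : pvZero.a = 0 ∧ pvZero.ab = 0 ∧ pvZero.abc = 0 := by simp [pvZero]
  rw [show ((pvZero.a, pvZero.ab, pvZero.abc) : Int × Int × Int) = (0,0,0) by simp [pvZero]] at h
  have := congrArg (fun t : Int × Int × Int => t.2.2) h
  simpa using this.symm
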